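-- pv_equiv track=rewrite | github.com/shukri26/TOY-PROBLEMS1 | solutions.py | solution
-- ===== SOURCE A (Python) =====
-- def solution(R):
--     maximum_indicator = 0
--     pothole_count = 0
--     pothole_depth = 0
--
--     for segment_depth in R:
--         if segment_depth == 0:
--             maximum_indicator = max(maximum_indicator, pothole_count * pothole_depth)
--             pothole_count = 0
--             pothole_depth = 0
--         else:
--             pothole_count += 1
--             pothole_depth = max(pothole_depth, segment_depth)
--
--     maximum_indicator = max(maximum_indicator, pothole_count * pothole_depth)
--     return maximum_indicator
-- ===== SOURCE B (Python) =====
-- def solution(R):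
--     # Group-then-reduce: split R into runs separated by zeros, then take the
--     # best run score len(run) * max([0] + run) over all runs.
--     runs = [[]]
--     for x in R:
--         if x == 0:
--             runs.append([])
--         else:
--             runs[-1].append(x)
--     best = 0
--     for run in runs:
--         best = max(best, len(run) * max([0] + run))
--     return best
-- ===== Notes on version B (the rewrite author's own statement) =====
-- stated objective: alternative
-- what changed: Replaces A's single-pass three-variable state machine by a group-then-reduce decomposition: first split R into zero-separated runs, then take the maximum over runs of the run length times the run's maximum floored at zero.
import Mathlib
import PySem

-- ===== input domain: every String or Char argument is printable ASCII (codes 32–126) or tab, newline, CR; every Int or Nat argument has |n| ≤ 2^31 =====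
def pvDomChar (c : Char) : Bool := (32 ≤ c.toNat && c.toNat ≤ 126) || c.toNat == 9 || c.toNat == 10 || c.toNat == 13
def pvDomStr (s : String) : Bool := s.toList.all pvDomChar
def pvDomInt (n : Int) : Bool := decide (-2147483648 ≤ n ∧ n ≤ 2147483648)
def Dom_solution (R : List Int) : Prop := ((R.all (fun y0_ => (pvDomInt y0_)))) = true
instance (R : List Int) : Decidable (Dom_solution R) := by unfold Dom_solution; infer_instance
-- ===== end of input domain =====

-- B replaces A's single-pass state machine by a group-then-reduce decomposition (same cost; equivalence of return values proved below).

-- ===== PORT A =====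
-- one loop step of A: state = (maximum_indicator, pothole_count, pothole_depth)
def pvStepA (st : Int × Int × Int) (d : Int) : Int × Int × Int :=
  if d = 0 then (max st.1 (st.2.1 * st.2.2), 0, 0)
  else (st.1, st.2.1 + 1, max st.2.2 d)

def solution (R : List Int) : Int :=
  let s := R.foldl pvStepA (0, 0, 0)
  max s.1 (s.2.1 * s.2.2)

-- ===== PORT B =====
-- the zero-separated runs of R (first run at the head, exactly Source B's `runs` list)
def pvRuns : List Int → List (List Int)
  | [] => [[]]
  | x :: xs =>
    match pvRuns xs with
    | [] => [[]]          -- unreachable: pvRuns always returns a nonempty list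
    | r :: rs => if x = 0 then [] :: r :: rs else (x :: r) :: rs

-- max([0] + run)
def pvRmax (r : List Int) : Int := r.foldl max 0

def solution_alt (R : List Int) : Int :=
  (pvRuns R).foldl (fun b r => max b ((r.length : Int) * pvRmax r)) 0

-- ===== PRECONDITION & SPEC =====
def Spec_solution (R : List Int) (out : Int) : Prop := out = solution_alt R
instance (R : List Int) (out : Int) : Decidable (Spec_solution R out) := by unfold Spec_solution; infer_instance

-- ===== CLAIM (what is proved, stated in full; the proofs are below) =====
def Claim_equal_solution : Prop := ∀ (R : List Int), Dom_solution R → Spec_solution R (solution R)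

-- ===== LEMMAS AND PROOFS =====

lemma foldl_max_max (r : List Int) : ∀ a b : Int, r.foldl max (max a b) = max a (r.foldl max b) := by
  induction r with
  | nil => intro a b; simp
  | cons y r ih =>
    intro a b
    simp only [List.foldl]
    rw [max_assoc, ih]

lemma pvRmax_nonneg (r : List Int) : 0 ≤ pvRmax r := by
  cases r with
  | nil => simp [pvRmax]
  | cons y r =>
    simp only [pvRmax, List.foldl]
    rw [show max (0 : Int) y = max 0 (max 0 y) by omega, foldl_max_max]
    exact le_max_left _ _

lemma pvRmax_cons (x : Int) (r : List Int) : pvRmax (x :: r) = max x (pvRmax r) := by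
  simp only [pvRmax, List.foldl]
  rw [show max (0 : Int) x = max x 0 by omega, foldl_max_max]

-- recursive "best score" over a list of runs
def pvBest : List (List Int) → Int
  | [] => 0
  | r :: rs => max ((r.length : Int) * pvRmax r) (pvBest rs)

lemma foldl_best (rs : List (List Int)) : ∀ a : Int, 0 ≤ a →
    rs.foldl (fun b r => max b ((r.length : Int) * pvRmax r)) a = max a (pvBest rs) := by
  induction rs with
  | nil => intro a ha; simp [pvBest]; omega
  | cons r rs ih =>
    intro a ha
    simp only [List.foldl, pvBest]
    rw [ih _ (le_trans ha (le_max_left _ _))]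
    omega

lemma pvRuns_ne_nil (R : List Int) : pvRuns R ≠ [] := by
  cases R with
  | nil => simp [pvRuns]
  | cons x xs =>
    simp only [pvRuns]
    cases pvRuns xs with
    | nil => simp
    | cons r rs => by_cases hx : x = 0 <;> simp [hx]

-- main loop invariant: A's fold from state (m, c, p) vs B's runs of the remaining list
lemma main_inv (R : List Int) : ∀ m c p : Int, 0 ≤ c → 0 ≤ p →
    (let s := R.foldl pvStepA (m, c, p)
     max s.1 (s.2.1 * s.2.2)) =
    max m (max ((c + ((pvRuns R).headI.length : Int)) * max p (pvRmax (pvRuns R).headI))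
              (pvBest (pvRuns R).tail)) := by
  induction R with
  | nil =>
    intro m c p hc hp
    simp only [List.foldl, pvRuns, List.headI, List.tail, pvBest, pvRmax, List.length_nil]
    have h1 : max p 0 = p := by omega
    have h2 : 0 ≤ c * p := mul_nonneg hc hp
    rw [h1]
    simp only [Nat.cast_zero, add_zero]
    omega
  | cons x xs ih =>
    intro m c p hc hp
    obtain ⟨h, t, heq⟩ : ∃ h t, pvRuns xs = h :: t := by
      cases hr : pvRuns xs with
      | nil => exact absurd hr (pvRuns_ne_nil xs)
      | cons h t => exact ⟨h, t, rfl⟩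
    by_cases hx : x = 0
    · subst hx
      simp only [List.foldl, pvStepA, reduceIte]
      rw [ih (max m (c * p)) 0 0 le_rfl le_rfl]
      have hr0 : pvRmax ([] : List Int) = 0 := rfl
      simp only [pvRuns, heq, reduceIte, List.headI, List.tail, pvBest, hr0,
        List.length_nil, Nat.cast_zero, add_zero, zero_add]
      have h2 : 0 ≤ c * p := mul_nonneg hc hp
      have h3 : max (0 : Int) (pvRmax h) = pvRmax h := max_eq_right (pvRmax_nonneg h)
      rw [h3]
      have h4 : max p 0 = p := by omega
      rw [h4]
      generalize c * p = A
      generalize (h.length : Int) * pvRmax h = B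
      omega
    · simp only [List.foldl, pvStepA, if_neg hx]
      rw [ih m (c + 1) (max p x) (by omega) (by omega)]
      simp only [pvRuns, heq, if_neg hx, List.headI, List.tail, List.length_cons]
      rw [pvRmax_cons]
      have h5 : max p (max x (pvRmax h)) = max (max p x) (pvRmax h) := (max_assoc p x _).symm
      rw [h5]
      have h6 : (c + ((h.length : Nat) + 1 : Nat)) = (c + 1 + (h.length : Int)) := by
        push_cast; ring
      rw [h6]

-- ===== VERDICT (by name: the statement is the Claim_ definition above) =====
theorem solution_spec : Claim_equal_solution := by
  intro R _
  show solution R = solution_alt R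
  obtain ⟨h, t, heq⟩ : ∃ h t, pvRuns R = h :: t := by
    cases hr : pvRuns R with
    | nil => exact absurd hr (pvRuns_ne_nil R)
    | cons h t => exact ⟨h, t, rfl⟩
  have hA := main_inv R 0 0 0 le_rfl le_rfl
  rw [heq] at hA
  simp only [List.headI, List.tail, zero_add,
    max_eq_right (pvRmax_nonneg h)] at hA
  unfold solution
  rw [hA]
  unfold solution_alt
  rw [heq, foldl_best (h :: t) 0 le_rfl]
  simp only [pvBest]
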